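-- pv_equiv track=rewrite | github.com/yogeshhk/TeachingDataScience | Admin/Interview/src/geeks_LargestWord.py | find_largest_word
-- ===== SOURCE A (Python) =====
-- def find_largest_word(words, word):
--     word_count = {}
--     for c in word:
--         if c in word_count:
--             word_count[c] += 1
--         else:
--             word_count[c] = 1
--     max_word = ""
--     for w in words:
--         word_count_copy = word_count.copy()
--         w_len = len(w)
--         for c in w:
--             if c in word_count_copy and word_count_copy[c] != 0:
--                 word_count_copy[c] -= 1
--             else:
--                 w_len -= 1
--         if w_len > len(max_word):
--             max_word = w
--     return max_word
-- ===== SOURCE B (Python) =====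
-- def find_largest_word(words, word):
--     need = {}
--     for c in word:
--         need[c] = need.get(c, 0) + 1
--     max_word = ""
--     for w in words:
--         have = {}
--         for c in w:
--             have[c] = have.get(c, 0) + 1
--         score = sum(min(v, need.get(c, 0)) for c, v in have.items())
--         if score > len(max_word):
--             max_word = w
--     return max_word
-- ===== Notes on version B (the rewrite author's own statement) =====
-- stated objective: simpler
-- what changed: The per-word consume-the-dict-copy loop (copy the count dict, decrement entries, track a shrinking length) is replaced by counting each word once and summing per-character minima against the precomputed counts of `word`; the selection step (score > len(max_word)) is kept unchanged.
import Mathlib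
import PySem

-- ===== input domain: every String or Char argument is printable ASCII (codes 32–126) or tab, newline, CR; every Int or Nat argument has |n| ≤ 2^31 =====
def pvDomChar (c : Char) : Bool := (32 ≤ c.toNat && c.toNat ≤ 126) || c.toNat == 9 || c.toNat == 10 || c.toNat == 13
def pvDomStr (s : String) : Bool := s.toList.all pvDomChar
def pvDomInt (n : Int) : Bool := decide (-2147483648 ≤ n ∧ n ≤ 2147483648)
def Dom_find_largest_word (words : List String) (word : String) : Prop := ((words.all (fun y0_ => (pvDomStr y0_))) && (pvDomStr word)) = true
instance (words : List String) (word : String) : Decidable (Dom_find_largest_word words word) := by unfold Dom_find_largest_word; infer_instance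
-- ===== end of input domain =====

-- B replaces A's per-word consume-a-copy-of-the-count-dict loop by counting each word once
-- and summing per-character minima against the counts of `word`; the selection step
-- (score > len(max_word)) is unchanged.  Objective: simpler.

-- ===== PORT A =====
def find_largest_word (words : List String) (word : String) : String :=
  let word_count : PySem.Dict Char Int :=
    word.toList.foldl (fun d c =>
      if d.contains c then d.insert c (d.getD c 0 + 1) else d.insert c 1)
      PySem.Dict.empty
  words.foldl (fun max_word w =>
    let res := w.toList.foldl (fun (st : PySem.Dict Char Int × Int) c =>
        if st.1.contains c ∧ st.1.getD c 0 ≠ 0 then (st.1.insert c (st.1.getD c 0 - 1), st.2)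
        else (st.1, st.2 - 1))
      (word_count, PySem.Str.len w)
    if res.2 > PySem.Str.len max_word then w else max_word) ""

-- ===== PORT B =====
def find_largest_word_alt (words : List String) (word : String) : String :=
  let need : PySem.Dict Char Int :=
    word.toList.foldl (fun d c => d.insert c (d.getD c 0 + 1)) PySem.Dict.empty
  words.foldl (fun max_word w =>
    let haveCnt : PySem.Dict Char Int :=
      w.toList.foldl (fun d c => d.insert c (d.getD c 0 + 1)) PySem.Dict.empty
    let score := (haveCnt.items.map (fun p => min p.2 (need.getD p.1 0))).sum
    if score > PySem.Str.len max_word then w else max_word) ""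

-- ===== PRECONDITION & SPEC =====
def Spec_find_largest_word (words : List String) (word : String) (out : String) : Prop := out = find_largest_word_alt words word
instance (words : List String) (word : String) (out : String) : Decidable (Spec_find_largest_word words word out) := by unfold Spec_find_largest_word; infer_instance

-- ===== CLAIM (what is proved, stated in full; the proofs are below) =====
def Claim_equal_find_largest_word : Prop := ∀ (words : List String) (word : String), Dom_find_largest_word words word → Spec_find_largest_word words word (find_largest_word words word)

-- ===== LEMMAS AND PROOFS =====

-- the value A's greedy inner loop adds to w_len - len(w): consume chars left to right
-- against an available-count function f
def consume (cs : List Char) (f : Char → Int) : Int :=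
  match cs with
  | [] => 0
  | c :: rest => if 0 < f c then 1 + consume rest (fun x => if x = c then f c - 1 else f x) else consume rest f

-- A's word_count-building loop is the standard counter loop
lemma wordCount_eq_counter (s : List Char) :
    s.foldl (fun d c =>
      if d.contains c then d.insert c (d.getD c 0 + 1) else d.insert c 1)
      PySem.Dict.empty = PySem.Dict.counter s := by
  rw [PySem.List.foldl_congr_mem
      (g := fun (d : PySem.Dict Char Int) c => d.insert c (d.getD c 0 + 1))]
  · exact PySem.Dict.foldl_insert_getD_add_one_eq_counter s
  · intro d c _
    by_cases h : d.contains c = true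
    · simp [h]
    · simp only [Bool.not_eq_true] at h
      simp [h, PySem.Dict.getD_of_not_contains d 0 h]

-- A's inner consume loop, characterised via `consume`
lemma foldA_eq_consume (cs : List Char) (d : PySem.Dict Char Int) (l : Int)
    (hnn : ∀ c, 0 ≤ d.getD c 0) :
    (cs.foldl (fun (st : PySem.Dict Char Int × Int) c =>
        if st.1.contains c ∧ st.1.getD c 0 ≠ 0 then (st.1.insert c (st.1.getD c 0 - 1), st.2)
        else (st.1, st.2 - 1)) (d, l)).2
      = l - cs.length + consume cs (fun c => d.getD c 0) := by
  induction cs generalizing d l with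
  | nil => simp [consume]
  | cons c rest ih =>
    by_cases h : 0 < d.getD c 0
    · have hc : d.contains c = true := by
        by_contra hcf
        simp only [Bool.not_eq_true] at hcf
        rw [PySem.Dict.getD_of_not_contains d 0 hcf] at h
        omega
      have hcond : d.contains c ∧ d.getD c 0 ≠ 0 := ⟨hc, by omega⟩
      simp only [List.foldl_cons, if_pos hcond]
      rw [ih (d.insert c (d.getD c 0 - 1)) l
          (by intro x; rw [PySem.Dict.getD_insert]; split_ifs with hx
              · omega
              · exact hnn x)]
      have hfun : (fun x => (d.insert c (d.getD c 0 - 1)).getD x 0)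
          = fun x => if x = c then d.getD c 0 - 1 else d.getD x 0 := by
        funext x; rw [PySem.Dict.getD_insert]
      rw [hfun]
      simp only [consume, if_pos h, List.length_cons]
      push_cast
      omega
    · have hz : d.getD c 0 = 0 := by have := hnn c; omega
      have hcond : ¬ (d.contains c ∧ d.getD c 0 ≠ 0) := by
        intro hcd; exact hcd.2 hz
      simp only [List.foldl_cons, if_neg hcond]
      rw [ih d (l - 1) hnn]
      simp only [consume, if_neg h, List.length_cons]
      push_cast
      omega

-- the greedy consume total is the sum of per-character minima
lemma consume_eq_sum (cs : List Char) (f : Char → Int) (hnn : ∀ c, 0 ≤ f c) :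
    consume cs f = ∑ x ∈ cs.toFinset, min ((cs.count x : Int)) (f x) := by
  induction cs generalizing f with
  | nil => simp [consume]
  | cons c rest ih =>
    rw [List.toFinset_cons]
    by_cases h : 0 < f c
    · simp only [consume, if_pos h]
      rw [ih _ (by
        intro x
        by_cases hx : x = c
        · simp only [hx]; omega
        · simp only [if_neg hx]; exact hnn x)]
      by_cases hm : c ∈ rest.toFinset
      · rw [Finset.insert_eq_self.mpr hm]
        rw [← Finset.add_sum_erase _ _ hm, ← Finset.add_sum_erase _ _ hm]
        have hrest : ∑ x ∈ rest.toFinset.erase c, min ((rest.count x : Int)) (if x = c then f c - 1 else f x)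
            = ∑ x ∈ rest.toFinset.erase c, min (((c :: rest).count x : Int)) (f x) := by
          apply Finset.sum_congr rfl
          intro x hx
          have hxc : x ≠ c := Finset.ne_of_mem_erase hx
          rw [if_neg hxc, List.count_cons_of_ne (Ne.symm hxc)]
        rw [hrest]
        have : min ((rest.count c : Int)) (f c - 1) + 1 = min (((c :: rest).count c : Int)) (f c) := by
          rw [List.count_cons_self]
          push_cast
          omega
        rw [if_pos rfl]
        omega
      · rw [Finset.sum_insert hm]
        have h0 : rest.count c = 0 := by
          simp only [List.mem_toFinset] at hm
          exact List.count_eq_zero.mpr hm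
        have hrest : ∑ x ∈ rest.toFinset, min ((rest.count x : Int)) (if x = c then f c - 1 else f x)
            = ∑ x ∈ rest.toFinset, min (((c :: rest).count x : Int)) (f x) := by
          apply Finset.sum_congr rfl
          intro x hx
          have hxc : x ≠ c := by rintro rfl; exact hm hx
          rw [if_neg hxc, List.count_cons_of_ne (Ne.symm hxc)]
        rw [hrest]
        have : min (((c :: rest).count c : Int)) (f c) = 1 := by
          rw [List.count_cons_self, h0]
          push_cast
          omega
        omega
    · have hz : f c = 0 := by have := hnn c; omega
      simp only [consume, if_neg h]
      rw [ih f hnn]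
      by_cases hm : c ∈ rest.toFinset
      · rw [Finset.insert_eq_self.mpr hm]
        apply Finset.sum_congr rfl
        intro x hx
        by_cases hxc : x = c
        · subst hxc; rw [hz]; omega
        · rw [List.count_cons_of_ne (Ne.symm hxc)]
      · rw [Finset.sum_insert hm]
        have hc0 : min (((c :: rest).count c : Int)) (f c) = 0 := by
          rw [hz]
          omega
        rw [hc0, zero_add]
        apply Finset.sum_congr rfl
        intro x hx
        have hxc : x ≠ c := by rintro rfl; exact hm hx
        rw [List.count_cons_of_ne (Ne.symm hxc)]

-- B's per-word score is the same finite sum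
lemma scoreB_eq_sum (cs : List Char) (need : PySem.Dict Char Int) :
    (((PySem.Dict.counter cs).items.map (fun p => min p.2 (need.getD p.1 0))).sum : Int)
      = ∑ x ∈ cs.toFinset, min ((cs.count x : Int)) (need.getD x 0) := by
  rw [PySem.Dict.items_counter, List.map_map]
  have hfs : (PySem.Set.ofList cs).toFinset = cs.toFinset := by
    ext x
    simp [List.mem_toFinset, PySem.Set.mem_ofList]
  rw [← hfs, List.sum_toFinset _ (PySem.Set.nodup_ofList cs)]
  rfl

-- ===== VERDICT (by name: the statement is the Claim_ definition above) =====
theorem find_largest_word_spec : Claim_equal_find_largest_word := by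
  intro words word _
  unfold Spec_find_largest_word find_largest_word find_largest_word_alt
  simp only [wordCount_eq_counter, PySem.Dict.foldl_insert_getD_add_one_eq_counter]
  apply PySem.List.foldl_congr_mem
  intro acc w _
  have hnn : ∀ c, (0:Int) ≤ (PySem.Dict.counter word.toList).getD c 0 := fun c => by
    rw [PySem.Dict.getD_counter]; positivity
  have hA := foldA_eq_consume w.toList (PySem.Dict.counter word.toList) (PySem.Str.len w) hnn
  have hC := consume_eq_sum w.toList (fun c => (PySem.Dict.counter word.toList).getD c 0) hnn
  have hB := scoreB_eq_sum w.toList (PySem.Dict.counter word.toList)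
  simp only [hA]
  simp only [hC, hB, PySem.Str.len_eq, sub_self, zero_add]
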